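-- pv_equiv track=rewrite | github.com/cakelake1/Python-study | 1.3/17_task.py | LineAnalysis
-- ===== SOURCE A (Python) =====
-- def LineAnalysis(line):
--     if not line.startswith('*') or not line.endswith('*'):
--         return False
--     words = line.split('*')[1:-1]
--     sample = next((i for i in words if i), None)
--     if sample is None:
--         return True
--     return(all(i == sample or not i for i in words)  and
--            (all(not i for i in words) or all(i for i in words)))
-- ===== SOURCE B (Python) =====
-- def LineAnalysis(line):
--     if line.startswith('*') and line.endswith('*'):
--         words = line.split('*')[1:-1]
--         return len(set(words)) <= 1
--     return False
-- ===== Notes on version B (the rewrite author's own statement) =====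
-- stated objective: simpler
-- what changed: Replaced the first-nonempty-word search plus two all() scans with a single distinct-count check len(set(words)) <= 1 after the same guard and slice.
import Mathlib
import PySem

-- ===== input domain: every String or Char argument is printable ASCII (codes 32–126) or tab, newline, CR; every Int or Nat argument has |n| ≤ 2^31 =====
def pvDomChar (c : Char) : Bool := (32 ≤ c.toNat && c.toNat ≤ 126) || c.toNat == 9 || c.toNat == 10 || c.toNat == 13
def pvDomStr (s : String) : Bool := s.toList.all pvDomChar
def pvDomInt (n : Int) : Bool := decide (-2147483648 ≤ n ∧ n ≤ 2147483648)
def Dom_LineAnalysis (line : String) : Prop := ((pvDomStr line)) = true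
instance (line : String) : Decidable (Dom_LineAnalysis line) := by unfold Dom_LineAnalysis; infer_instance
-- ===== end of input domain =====

-- B replaces A's first-nonempty search and double all() scans with one distinct-count
-- check on the same word list; same cost, simpler.

-- ===== PORT A =====
def LineAnalysis (line : String) : Bool :=
  if !(PySem.Str.startswith line "*") || !(PySem.Str.endswith line "*") then false
  else
    let words := PySem.List.slice ((PySem.Str.split? line "*").getD []) (some 1) (some (-1))
    match words.find? (fun i => i != "") with
    | none => true
    | some sample =>
        (words.all (fun i => i == sample || i == "")) &&
        ((words.all (fun i => i == "")) || (words.all (fun i => i != "")))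

-- ===== PORT B =====
def LineAnalysis_alt (line : String) : Bool :=
  if PySem.Str.startswith line "*" && PySem.Str.endswith line "*" then
    let words := PySem.List.slice ((PySem.Str.split? line "*").getD []) (some 1) (some (-1))
    decide ((PySem.Set.ofList words).length ≤ 1)
  else false

-- ===== PRECONDITION & SPEC =====
def Spec_LineAnalysis (line : String) (out : Bool) : Prop := out = LineAnalysis_alt line
instance (line : String) (out : Bool) : Decidable (Spec_LineAnalysis line out) := by unfold Spec_LineAnalysis; infer_instance

-- ===== CLAIM (what is proved, stated in full; the proofs are below) =====
def Claim_equal_LineAnalysis : Prop := ∀ (line : String), Dom_LineAnalysis line → Spec_LineAnalysis line (LineAnalysis line)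

-- ===== LEMMAS AND PROOFS =====

-- a nodup list whose elements are pairwise equal has at most one element
theorem pv_len_le_one {α : Type} (l : List α) (hn : l.Nodup)
    (h : ∀ a ∈ l, ∀ b ∈ l, a = b) : l.length ≤ 1 := by
  match l with
  | [] => simp
  | [a] => simp
  | a :: b :: t =>
      exfalso
      have hab : a = b := h a (by simp) b (by simp)
      simp [hab] at hn

theorem pv_eq_of_len_le_one {α : Type} (l : List α) (h : l.length ≤ 1) :
    ∀ a ∈ l, ∀ b ∈ l, a = b := by
  match l with
  | [] => simp
  | [x] => intro a ha b hb; simp at ha hb; simp [ha, hb]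
  | a :: b :: t => simp at h

-- B's distinct count on any word list equals "all words are equal"
theorem pv_set_iff (ws : List String) :
    (PySem.Set.ofList ws).length ≤ 1 ↔ ∀ a ∈ ws, ∀ b ∈ ws, a = b := by
  constructor
  · intro h a ha b hb
    exact pv_eq_of_len_le_one _ h a (by simpa [PySem.Set.mem_ofList] using ha)
      b (by simpa [PySem.Set.mem_ofList] using hb)
  · intro h
    refine pv_len_le_one _ (PySem.Set.nodup_ofList ws) ?_
    intro a ha b hb
    exact h a (by simpa [PySem.Set.mem_ofList] using ha)
      b (by simpa [PySem.Set.mem_ofList] using hb)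

-- A's first-nonempty search plus the two all() scans also decide "all words are equal"
theorem pv_a_iff (ws : List String) :
    (match ws.find? (fun i => i != "") with
     | none => true
     | some sample =>
         (ws.all (fun i => i == sample || i == "")) &&
         ((ws.all (fun i => i == "")) || (ws.all (fun i => i != "")))) = true
    ↔ ∀ a ∈ ws, ∀ b ∈ ws, a = b := by
  cases hf : ws.find? (fun i => i != "") with
  | none =>
      have hall : ∀ x ∈ ws, x = "" := by
        intro x hx
        have := List.find?_eq_none.mp hf x hx
        simpa using this
      simp only [true_iff]
      intro a ha b hb
      rw [hall a ha, hall b hb]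
  | some sample =>
      have hmem : sample ∈ ws := List.mem_of_find?_eq_some hf
      have hne : sample ≠ "" := by
        have := List.find?_some hf
        simpa using this
      simp only [List.all_eq_true, Bool.and_eq_true, Bool.or_eq_true, beq_iff_eq, bne_iff_ne,
        ne_eq]
      constructor
      · rintro ⟨h1, h2⟩ a ha b hb
        have hx : ∀ x ∈ ws, x = sample := by
          intro x hx
          rcases h2 with h2 | h2
          · exact absurd (h2 sample hmem) hne
          · rcases h1 x hx with h | h
            · exact h
            · exact absurd h (h2 x hx)
        rw [hx a ha, hx b hb]
      · intro h
        have hx : ∀ x ∈ ws, x = sample := fun x hxm => h x hxm sample hmem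
        exact ⟨fun x hxm => Or.inl (hx x hxm),
          Or.inr (fun x hxm => by rw [hx x hxm]; exact hne)⟩

-- the two bodies agree on every word list
theorem pv_body (ws : List String) :
    (match ws.find? (fun i => i != "") with
     | none => true
     | some sample =>
         (ws.all (fun i => i == sample || i == "")) &&
         ((ws.all (fun i => i == "")) || (ws.all (fun i => i != ""))))
    = decide ((PySem.Set.ofList ws).length ≤ 1) := by
  rw [Bool.eq_iff_iff, pv_a_iff, decide_eq_true_iff]
  exact (pv_set_iff ws).symm

-- ===== VERDICT (by name: the statement is the Claim_ definition above) =====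
theorem LineAnalysis_spec : Claim_equal_LineAnalysis := by
  intro line _
  unfold Spec_LineAnalysis LineAnalysis LineAnalysis_alt
  rcases Bool.eq_false_or_eq_true (PySem.Str.startswith line "*") with hs | hs <;>
    rcases Bool.eq_false_or_eq_true (PySem.Str.endswith line "*") with he | he <;>
      simp [hs, he, pv_body]
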